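-- pv_equiv track=rewrite | github.com/pypi-data/pypi-mirror-391 | packages/keepersdk/keepersdk-1.0.1-py3-none-any.whl/keepersdk/vault/typed_field_utils.py | import_phone_field
-- ===== SOURCE A (Python) =====
-- from typing import Optional, Tuple, List
--
-- def import_phone_field(value: str) -> Optional[dict]:
--     if isinstance(value, str):
--         region = ''
--         number = ''
--         ext = ''
--         phone_type, _, rest = value.partition(':')
--         if not rest:
--             rest = phone_type
--             phone_type = ''
--         comps = rest.strip().split(' ')
--         for comp in comps:
--             comp = comp.strip()
--             if comp.isalpha():
--                 if len(comp) == 2: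
--                     if not region:
--                         region = comp
--                 elif not phone_type:
--                     phone_type = comp
--             elif len(comp) >= 6:
--                 if not number:
--                     number = comp
--             elif not ext:
--                 ext = comp
--         result = {
--             'type': '',
--             'region': '',
--             'number': number.strip(),
--             'ext': ext.strip()
--         }
--         phone_type = phone_type.strip()
--         region = region.strip()
--         if phone_type:
--             result['type'] = phone_type
--         if region:
--             result['region'] = region
--         return result
-- ===== SOURCE B (Python) =====
-- def import_phone_field(value):
--     if not isinstance(value, str):
--         return None
--     phone_type, _, rest = value.partition(':')
--     if not rest:
--         phone_type, rest = '', phone_type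
--     comps = [c.strip() for c in rest.strip().split(' ')]
--     region = next((c for c in comps if c.isalpha() and len(c) == 2), '')
--     number = next((c for c in comps if c and not c.isalpha() and len(c) >= 6), '')
--     ext = next((c for c in comps if c and not c.isalpha() and len(c) < 6), '')
--     if not phone_type:
--         phone_type = next((c for c in comps if c.isalpha() and len(c) != 2), '')
--     result = {'type': '', 'region': '', 'number': number, 'ext': ext}
--     phone_type = phone_type.strip()
--     if phone_type:
--         result['type'] = phone_type
--     if region:
--         result['region'] = region
--     return result
-- ===== Notes on version B (the rewrite author's own statement) =====
-- stated objective: simpler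
-- what changed: A's single stateful loop threading four mutable slots with nested priority branches is replaced by building the stripped component list once and computing each of the four fields with an independent first-match scan (next over a generator), assembled into the same dict.
import Mathlib
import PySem

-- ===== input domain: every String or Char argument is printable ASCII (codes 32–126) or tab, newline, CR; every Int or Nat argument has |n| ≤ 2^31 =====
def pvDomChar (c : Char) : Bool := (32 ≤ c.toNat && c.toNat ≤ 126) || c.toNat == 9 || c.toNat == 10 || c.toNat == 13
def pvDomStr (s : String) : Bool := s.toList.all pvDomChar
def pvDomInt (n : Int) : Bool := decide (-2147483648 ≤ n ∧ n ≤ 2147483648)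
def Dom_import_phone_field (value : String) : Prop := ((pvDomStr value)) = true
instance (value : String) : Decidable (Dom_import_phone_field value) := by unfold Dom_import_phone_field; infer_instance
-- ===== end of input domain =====

-- B replaces A's single stateful four-variable loop with one stripped component list and four
-- independent first-match scans (objective: simpler decomposition; same cost).

-- ===== PORT A =====
-- value.partition(':') : exact hand port for the single-character separator ':'
def pyPartitionColon (s : String) : String × String :=
  match s.toList.findIdx? (· == ':') with
  | some i => (String.ofList (s.toList.take i), String.ofList (s.toList.drop (i + 1)))
  | none => (s, "")

def import_phone_field (value : String) : Option (List (String × String)) :=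
  -- region = ''; number = ''; ext = ''
  -- phone_type, _, rest = value.partition(':'); if not rest: rest = phone_type; phone_type = ''
  let pr := pyPartitionColon value
  let pt_rest := if pr.2 = "" then ("", pr.1) else pr
  let comps := (PySem.Str.split? (PySem.Str.strip pt_rest.2) " ").getD []
  -- for comp in comps: …   (state = (region, number, ext, phone_type))
  let st := comps.foldl (fun (st : String × String × String × String) comp0 =>
      let comp := PySem.Str.strip comp0
      if PySem.Str.strIsalpha comp then
        if comp.length = 2 then
          (if st.1 = "" then (comp, st.2.1, st.2.2.1, st.2.2.2) else st)
        else (if st.2.2.2 = "" then (st.1, st.2.1, st.2.2.1, comp) else st)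
      else if 6 ≤ comp.length then
        (if st.2.1 = "" then (st.1, comp, st.2.2.1, st.2.2.2) else st)
      else (if st.2.2.1 = "" then (st.1, st.2.1, comp, st.2.2.2) else st))
    ("", "", "", pt_rest.1)
  let result := PySem.Dict.ofList
    [("type", ""), ("region", ""), ("number", PySem.Str.strip st.2.1), ("ext", PySem.Str.strip st.2.2.1)]
  let phone_type := PySem.Str.strip st.2.2.2
  let region := PySem.Str.strip st.1
  let result := if phone_type ≠ "" then result.insert "type" phone_type else result
  let result := if region ≠ "" then result.insert "region" region else result
  some result.items

-- ===== PORT B =====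
def import_phone_field_alt (value : String) : Option (List (String × String)) :=
  let pr := pyPartitionColon value
  let pt_rest := if pr.2 = "" then ("", pr.1) else pr
  let comps := ((PySem.Str.split? (PySem.Str.strip pt_rest.2) " ").getD []).map PySem.Str.strip
  let region := (comps.find? (fun c => PySem.Str.strIsalpha c && (c.length == 2))).getD ""
  let number := (comps.find? (fun c => !(c == "") && !PySem.Str.strIsalpha c && decide (6 ≤ c.length))).getD ""
  let ext := (comps.find? (fun c => !(c == "") && !PySem.Str.strIsalpha c && decide (c.length < 6))).getD ""
  let phone_type := if pt_rest.1 = ""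
    then (comps.find? (fun c => PySem.Str.strIsalpha c && !(c.length == 2))).getD ""
    else pt_rest.1
  let result := PySem.Dict.ofList
    [("type", ""), ("region", ""), ("number", number), ("ext", ext)]
  let phone_type := PySem.Str.strip phone_type
  let result := if phone_type ≠ "" then result.insert "type" phone_type else result
  let result := if region ≠ "" then result.insert "region" region else result
  some result.items

-- ===== PRECONDITION & SPEC =====
def Spec_import_phone_field (value : String) (out : Option (List (String × String))) : Prop := out = import_phone_field_alt value
instance (value : String) (out : Option (List (String × String))) : Decidable (Spec_import_phone_field value out) := by unfold Spec_import_phone_field; infer_instance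

-- ===== CLAIM (what is proved, stated in full; the proofs are below) =====
def Claim_equal_import_phone_field : Prop := ∀ (value : String), Dom_import_phone_field value → Spec_import_phone_field value (import_phone_field value)

-- ===== LEMMAS AND PROOFS =====

-- A's loop body on an already-stripped component, and the four first-match predicates
def pvStep (st : String × String × String × String) (comp : String) : String × String × String × String :=
  if PySem.Str.strIsalpha comp then
    if comp.length = 2 then
      (if st.1 = "" then (comp, st.2.1, st.2.2.1, st.2.2.2) else st)
    else (if st.2.2.2 = "" then (st.1, st.2.1, st.2.2.1, comp) else st)
  else if 6 ≤ comp.length then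
    (if st.2.1 = "" then (st.1, comp, st.2.2.1, st.2.2.2) else st)
  else (if st.2.2.1 = "" then (st.1, st.2.1, comp, st.2.2.2) else st)

def pvR : String → Bool := fun c => PySem.Str.strIsalpha c && (c.length == 2)
def pvN : String → Bool := fun c => !(c == "") && !PySem.Str.strIsalpha c && decide (6 ≤ c.length)
def pvE : String → Bool := fun c => !(c == "") && !PySem.Str.strIsalpha c && decide (c.length < 6)
def pvT : String → Bool := fun c => PySem.Str.strIsalpha c && !(c.length == 2)

def pvKeep (x : String) (o : Option String) : String := if x = "" then o.getD "" else x

theorem pvFold_char (cs : List String) : ∀ (r n e t : String),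
    cs.foldl pvStep (r, n, e, t) =
      (pvKeep r (cs.find? pvR), pvKeep n (cs.find? pvN),
       pvKeep e (cs.find? pvE), pvKeep t (cs.find? pvT)) := by
  induction cs with
  | nil => intro r n e t; simp [pvKeep]
  | cons c cs ih =>
    intro r n e t
    simp only [List.foldl_cons]
    by_cases ha : PySem.Chars.strIsalpha c.toList = true
    · have hc : c ≠ "" := by intro h; rw [h] at ha; exact absurd ha (by decide)
      have hpN : pvN c = false := by simp [pvN, ha]
      have hpE : pvE c = false := by simp [pvE, ha]
      by_cases h2 : c.length = 2
      · have hpR : pvR c = true := by simp [pvR, ha, h2]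
        have hpT : pvT c = false := by simp [pvT, ha, h2]
        rw [List.find?_cons_of_pos hpR, List.find?_cons_of_neg (by simp [hpN]),
            List.find?_cons_of_neg (by simp [hpE]), List.find?_cons_of_neg (by simp [hpT])]
        by_cases hr : r = ""
        · rw [show pvStep (r, n, e, t) c = (c, n, e, t) by simp [pvStep, ha, h2, hr], ih]
          simp [pvKeep, hr, hc]
        · rw [show pvStep (r, n, e, t) c = (r, n, e, t) by simp [pvStep, ha, h2, hr], ih]
          simp [pvKeep, hr]
      · have hpR : pvR c = false := by simp [pvR, h2]
        have hpT : pvT c = true := by simp [pvT, ha, h2]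
        rw [List.find?_cons_of_neg (by simp [hpR]), List.find?_cons_of_neg (by simp [hpN]),
            List.find?_cons_of_neg (by simp [hpE]), List.find?_cons_of_pos hpT]
        by_cases ht : t = ""
        · rw [show pvStep (r, n, e, t) c = (r, n, e, c) by simp [pvStep, ha, h2, ht], ih]
          simp [pvKeep, ht, hc]
        · rw [show pvStep (r, n, e, t) c = (r, n, e, t) by simp [pvStep, ha, h2, ht], ih]
          simp [pvKeep, ht]
    · have hpR : pvR c = false := by simp [pvR, ha]
      have hpT : pvT c = false := by simp [pvT, ha]
      by_cases h6 : 6 ≤ c.length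
      · have hc : c ≠ "" := by intro h; rw [h] at h6; exact absurd h6 (by decide)
        have hpN : pvN c = true := by simp [pvN, ha, hc, h6]
        have hpE : pvE c = false := by simp [pvE]; omega
        rw [List.find?_cons_of_neg (by simp [hpR]), List.find?_cons_of_pos hpN,
            List.find?_cons_of_neg (by simp [hpE]), List.find?_cons_of_neg (by simp [hpT])]
        by_cases hn : n = ""
        · rw [show pvStep (r, n, e, t) c = (r, c, e, t) by simp [pvStep, ha, h6, hn], ih]
          simp [pvKeep, hn, hc]
        · rw [show pvStep (r, n, e, t) c = (r, n, e, t) by simp [pvStep, ha, h6, hn], ih]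
          simp [pvKeep, hn]
      · by_cases hc : c = ""
        · subst hc
          have hstep : pvStep (r, n, e, t) "" = (r, n, e, t) := by
            by_cases he : e = "" <;>
              simp [pvStep, show PySem.Chars.strIsalpha ("" : String).toList = false by decide, he]
          rw [hstep, List.find?_cons_of_neg (by decide : ¬ pvR "" = true),
              List.find?_cons_of_neg (by decide : ¬ pvN "" = true),
              List.find?_cons_of_neg (by decide : ¬ pvE "" = true),
              List.find?_cons_of_neg (by decide : ¬ pvT "" = true)]
          exact ih r n e t
        · have hpN : pvN c = false := by simp [pvN]; omega
          have hpE : pvE c = true := by simp [pvE, ha, hc]; omega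
          rw [List.find?_cons_of_neg (by simp [hpR]), List.find?_cons_of_neg (by simp [hpN]),
              List.find?_cons_of_pos hpE, List.find?_cons_of_neg (by simp [hpT])]
          by_cases he : e = ""
          · rw [show pvStep (r, n, e, t) c = (r, n, c, t) by simp [pvStep, ha, h6, he], ih]
            simp [pvKeep, he, hc]
          · rw [show pvStep (r, n, e, t) c = (r, n, e, t) by simp [pvStep, ha, h6, he], ih]
            simp [pvKeep, he]

theorem dropWhile_dropWhile {α : Type} (p : α → Bool) (l : List α) :
    (l.dropWhile p).dropWhile p = l.dropWhile p := by
  induction l with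
  | nil => rfl
  | cons a l ih =>
    by_cases h : p a <;> simp [h, ih]

theorem dropWhile_prefix_of_eq {α : Type} (p : α → Bool) {l l' : List α}
    (h : l.dropWhile p = l) (hp : l' <+: l) : l'.dropWhile p = l' := by
  cases l' with
  | nil => rfl
  | cons a t =>
    cases l with
    | nil => simp at hp
    | cons b s =>
      have hab : a = b := by
        rcases hp with ⟨u, hu⟩
        exact ((List.cons.injEq _ _ _ _).mp hu.symm).1.symm
      subst hab
      have hpb : ¬ p a = true := by
        intro hx
        rw [List.dropWhile_cons_of_pos hx] at h
        have hlen := List.length_dropWhile_le p s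
        rw [h] at hlen
        simp at hlen
      exact List.dropWhile_cons_of_neg hpb

theorem chars_strip_strip (cs : List Char) :
    PySem.Chars.strip (PySem.Chars.strip cs) = PySem.Chars.strip cs := by
  unfold PySem.Chars.strip PySem.Chars.lstrip PySem.Chars.rstrip
  set p := PySem.Chars.isspace
  set t := cs.dropWhile p with ht
  have hts : t.dropWhile p = t := by rw [ht]; exact dropWhile_dropWhile p cs
  set u := ((t.reverse.dropWhile p).reverse) with hu
  have hurev : u.reverse = t.reverse.dropWhile p := by rw [hu, List.reverse_reverse]
  have hupre : u <+: t := by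
    have hsuf : t.reverse.dropWhile p <:+ t.reverse := List.dropWhile_suffix p
    rw [hu]
    exact List.reverse_suffix.mp (by simpa using hsuf)
  have h1 : u.dropWhile p = u := dropWhile_prefix_of_eq p hts hupre
  rw [h1, hurev, dropWhile_dropWhile, ← hurev, List.reverse_reverse]

theorem strip_strip (s : String) : PySem.Str.strip (PySem.Str.strip s) = PySem.Str.strip s := by
  unfold PySem.Str.strip
  rw [String.toList_ofList, chars_strip_strip]

theorem strip_getD_find? (p : String → Bool) (cs : List String) :
    PySem.Str.strip (((cs.map PySem.Str.strip).find? p).getD "") =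
      ((cs.map PySem.Str.strip).find? p).getD "" := by
  cases h : (cs.map PySem.Str.strip).find? p with
  | none => rfl
  | some c =>
    have hc := List.mem_of_find?_eq_some h
    rcases List.mem_map.mp hc with ⟨x, _, rfl⟩
    simpa using strip_strip x

theorem port_eq (value : String) : import_phone_field value = import_phone_field_alt value := by
  unfold import_phone_field import_phone_field_alt
  dsimp only
  have hfold : ∀ (comps : List String) (t0 : String),
      comps.foldl (fun (st : String × String × String × String) comp0 =>
        let comp := PySem.Str.strip comp0
        if PySem.Str.strIsalpha comp then
          if comp.length = 2 then
            (if st.1 = "" then (comp, st.2.1, st.2.2.1, st.2.2.2) else st)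
          else (if st.2.2.2 = "" then (st.1, st.2.1, st.2.2.1, comp) else st)
        else if 6 ≤ comp.length then
          (if st.2.1 = "" then (st.1, comp, st.2.2.1, st.2.2.2) else st)
        else (if st.2.2.1 = "" then (st.1, st.2.1, comp, st.2.2.2) else st))
        ("", "", "", t0)
      = (comps.map PySem.Str.strip).foldl pvStep ("", "", "", t0) := by
    intro comps t0
    rw [List.foldl_map]
    rfl
  rw [hfold, pvFold_char]
  simp only [pvKeep, reduceIte]
  rw [strip_getD_find? pvR, strip_getD_find? pvN, strip_getD_find? pvE]
  rfl

-- ===== VERDICT (by name: the statement is the Claim_ definition above) =====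
theorem import_phone_field_spec : Claim_equal_import_phone_field := by
  intro value _
  unfold Spec_import_phone_field
  exact port_eq value
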